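-- pv_equiv track=rewrite | github.com/cyberthreatgurl/handheld-radio-tracker | merge_masters.py | merge_and_deduplicate
-- ===== SOURCE A (Python) =====
-- def merge_and_deduplicate(models_list1, models_list2):
--     """Merge two lists of models and remove duplicates based on Brand+Model"""
--     # Use a dict with (Brand, Model) tuple as key to eliminate duplicates
--     unique_models = {}
--
--     for model in models_list1 + models_list2:
--         key = (model['Brand'], model['Model'].upper())
--         if key not in unique_models:
--             unique_models[key] = model
--
--     # Convert back to list and sort by Brand, then Model
--     merged = list(unique_models.values())
--     merged.sort(key=lambda x: (x['Brand'].lower(), x['Model'].upper()))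
--
--     return merged
-- ===== SOURCE B (Python) =====
-- def merge_and_deduplicate(models_list1, models_list2):
--     """Merge two lists of models and remove duplicates based on Brand+Model"""
--     # Stably sort the combined list first, then keep the first record per
--     # exact (Brand, Model.upper()) key; stability makes this the same record
--     # A's insertion-order dict keeps.
--     combined = sorted(models_list1 + models_list2,
--                       key=lambda x: (x['Brand'].lower(), x['Model'].upper()))
--     seen = set()
--     result = []
--     for model in combined:
--         key = (model['Brand'], model['Model'].upper())
--         if key not in seen:
--             seen.add(key)
--             result.append(model)
--     return result
-- ===== Notes on version B (the rewrite author's own statement) =====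
-- stated objective: alternative
-- what changed: A dedups first into an insertion-ordered dict keyed by (Brand, Model.upper()) and then sorts the surviving records; B stably sorts the whole combined list first and then keeps, in one pass with a seen set, the first record per exact dedup key, relying on sort stability to keep the same record A keeps.
import Mathlib
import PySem

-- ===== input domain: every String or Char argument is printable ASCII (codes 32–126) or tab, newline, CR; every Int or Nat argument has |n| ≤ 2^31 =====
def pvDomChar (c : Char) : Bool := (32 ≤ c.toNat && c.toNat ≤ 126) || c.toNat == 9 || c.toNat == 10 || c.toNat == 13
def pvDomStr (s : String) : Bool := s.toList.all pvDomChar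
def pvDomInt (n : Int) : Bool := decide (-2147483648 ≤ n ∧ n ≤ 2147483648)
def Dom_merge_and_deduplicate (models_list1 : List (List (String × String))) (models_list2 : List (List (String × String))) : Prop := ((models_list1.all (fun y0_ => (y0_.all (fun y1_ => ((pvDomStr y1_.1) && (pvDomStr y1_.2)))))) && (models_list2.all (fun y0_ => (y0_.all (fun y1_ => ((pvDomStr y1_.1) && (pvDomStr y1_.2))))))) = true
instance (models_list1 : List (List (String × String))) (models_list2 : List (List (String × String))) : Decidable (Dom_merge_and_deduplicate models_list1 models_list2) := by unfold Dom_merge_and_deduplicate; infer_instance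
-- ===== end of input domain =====

-- B replaces A's dedup-into-an-insertion-ordered-dict-then-sort by sort-first-then-one-pass
-- first-occurrence filter with a seen set (objective: alternative decomposition, same cost).

-- ===== PORT A =====
-- model['K'] — assoc-list dict lookup, first match; total here via getD "", Pre_ excludes the
-- inputs where the key is absent (Python raises KeyError there).
def pvGet (m : List (String × String)) (k : String) : String :=
  ((PySem.Dict.mk m).get? k).getD ""

-- key = (model['Brand'], model['Model'].upper())
def pvKey (m : List (String × String)) : String × String :=
  (pvGet m "Brand", PySem.Str.upper (pvGet m "Model"))

def merge_and_deduplicate (models_list1 : List (List (String × String))) (models_list2 : List (List (String × String))) : List (List (String × String)) :=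
  -- unique_models = {}; for model in models_list1 + models_list2: if key not in …: insert
  let unique_models : PySem.Dict (String × String) (List (String × String)) :=
    (models_list1 ++ models_list2).foldl
      (fun d model =>
        if !(d.contains (pvKey model)) then d.insert (pvKey model) model else d)
      PySem.Dict.empty
  -- merged = list(unique_models.values()); merged.sort(key=lambda x: (Brand.lower(), Model.upper()))
  PySem.List.sorted2 unique_models.values
    (fun x => PySem.Str.lower (pvGet x "Brand"))
    (fun x => PySem.Str.upper (pvGet x "Model"))

-- ===== PORT B =====
def merge_and_deduplicate_alt (models_list1 : List (List (String × String))) (models_list2 : List (List (String × String))) : List (List (String × String)) :=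
  -- combined = sorted(models_list1 + models_list2, key=…)
  let combined :=
    PySem.List.sorted2 (models_list1 ++ models_list2)
      (fun x => PySem.Str.lower (pvGet x "Brand"))
      (fun x => PySem.Str.upper (pvGet x "Model"))
  -- seen = set(); result = []; for model in combined: if key not in seen: add, append
  (combined.foldl
    (fun (st : PySem.Set (String × String) × List (List (String × String))) model =>
      if PySem.Set.contains st.1 (pvKey model) then st
      else (PySem.Set.add st.1 (pvKey model), st.2 ++ [model]))
    (PySem.Set.empty, [])).2

-- ===== PRECONDITION & SPEC =====
-- Pre_ excludes exactly the inputs where some model lacks a 'Brand' or 'Model' key: there the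
-- Python A raises KeyError (no narrowing beyond that).
def Pre_merge_and_deduplicate (models_list1 : List (List (String × String))) (models_list2 : List (List (String × String))) : Prop :=
  ∀ m ∈ models_list1 ++ models_list2,
    (PySem.Dict.mk m).contains "Brand" = true ∧ (PySem.Dict.mk m).contains "Model" = true
instance (models_list1 : List (List (String × String))) (models_list2 : List (List (String × String))) : Decidable (Pre_merge_and_deduplicate models_list1 models_list2) := by unfold Pre_merge_and_deduplicate; infer_instance

def pvWitness_merge_and_deduplicate : (List (List (String × String))) × (List (List (String × String))) :=
  ([[("Brand", "Yaesu"), ("Model", "ft-60")]],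
   [[("Brand", "Yaesu"), ("Model", "FT-60")], [("Brand", "Icom"), ("Model", "ID-52")]])

def Spec_merge_and_deduplicate (models_list1 : List (List (String × String))) (models_list2 : List (List (String × String))) (out : List (List (String × String))) : Prop := out = merge_and_deduplicate_alt models_list1 models_list2
instance (models_list1 : List (List (String × String))) (models_list2 : List (List (String × String))) (out : List (List (String × String))) : Decidable (Spec_merge_and_deduplicate models_list1 models_list2 out) := by unfold Spec_merge_and_deduplicate; infer_instance

-- ===== CLAIM (what is proved, stated in full; the proofs are below) =====
def Claim_equal_merge_and_deduplicate : Prop := ∀ (models_list1 : List (List (String × String))) (models_list2 : List (List (String × String))), Dom_merge_and_deduplicate models_list1 models_list2 → Pre_merge_and_deduplicate models_list1 models_list2 → Spec_merge_and_deduplicate models_list1 models_list2 (merge_and_deduplicate models_list1 models_list2)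

-- ===== LEMMAS AND PROOFS =====

-- The two sort keys, named for the proofs.
def pvK1 (m : List (String × String)) : String := PySem.Str.lower (pvGet m "Brand")
def pvK2 (m : List (String × String)) : String := PySem.Str.upper (pvGet m "Model")

-- The comparison sorted2 uses, and insertion sort spelled with it.
def pvLt (a b : List (String × String)) : Bool :=
  decide (pvK1 a < pvK1 b) || (!decide (pvK1 b < pvK1 a) && decide (pvK2 a < pvK2 b))

def pvIns (x : List (String × String)) (l : List (List (String × String))) : List (List (String × String)) :=
  PySem.List.insertBy pvLt x l

def pvSort (xs : List (List (String × String))) : List (List (String × String)) :=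
  xs.foldl (fun acc x => pvIns x acc) []

-- First-occurrence filter by pvKey, with an accumulated seen list.
def pvF (seen : List (String × String)) : List (List (String × String)) → List (List (String × String))
  | [] => []
  | m :: ms => if pvKey m ∈ seen then pvF seen ms else m :: pvF (seen ++ [pvKey m]) ms

lemma pvF_cons (s : List (String × String)) (m : List (String × String))
    (ms : List (List (String × String))) :
    pvF s (m :: ms) = if pvKey m ∈ s then pvF s ms else m :: pvF (s ++ [pvKey m]) ms := rfl

lemma sorted2_eq_pvSort (xs : List (List (String × String))) :
    PySem.List.sorted2 xs (fun x => PySem.Str.lower (pvGet x "Brand"))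
      (fun x => PySem.Str.upper (pvGet x "Model")) = pvSort xs := rfl

lemma pvK1_key {a b : List (String × String)} (h : pvKey a = pvKey b) : pvK1 a = pvK1 b := by
  have : (pvKey a).1 = (pvKey b).1 := by rw [h]
  simpa [pvKey, pvK1] using congrArg PySem.Str.lower this

lemma pvK2_key {a b : List (String × String)} (h : pvKey a = pvKey b) : pvK2 a = pvK2 b := by
  have : (pvKey a).2 = (pvKey b).2 := by rw [h]
  simp [pvKey, pvK2] at this
  exact this

lemma pvLt_iff (a b : List (String × String)) :
    pvLt a b = true ↔ toLex (pvK1 a, pvK2 a) < toLex (pvK1 b, pvK2 b) := by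
  simp only [pvLt, Bool.or_eq_true, Bool.and_eq_true, Bool.not_eq_eq_eq_not, Bool.not_true,
    decide_eq_true_eq, decide_eq_false_iff_not, Prod.Lex.lt_iff, ofLex_toLex]
  constructor
  · rintro (h | ⟨h1, h2⟩)
    · exact Or.inl h
    · by_cases hlt : pvK1 a < pvK1 b
      · exact Or.inl hlt
      · exact Or.inr ⟨le_antisymm (not_lt.1 h1) (not_lt.1 hlt), h2⟩
  · rintro (h | ⟨h1, h2⟩)
    · exact Or.inl h
    · exact Or.inr ⟨by rw [h1]; exact lt_irrefl _, h2⟩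

lemma pvLt_false_iff (a b : List (String × String)) :
    pvLt a b = false ↔ toLex (pvK1 b, pvK2 b) ≤ toLex (pvK1 a, pvK2 a) := by
  rw [← not_lt, ← pvLt_iff]
  cases h : pvLt a b <;> simp

lemma pvLt_asymm {a b : List (String × String)} (h : pvLt a b = true) : pvLt b a = false := by
  rw [pvLt_iff] at h; rw [pvLt_false_iff]; exact le_of_lt h

lemma pvLt_trans {a b c : List (String × String)} (h1 : pvLt a b = true)
    (h2 : pvLt b c = true) : pvLt a c = true := by
  rw [pvLt_iff] at h1 h2 ⊢; exact lt_trans h1 h2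

lemma pvLt_of_key {a b : List (String × String)} (h : pvKey a = pvKey b) : pvLt a b = false := by
  rw [pvLt_false_iff, pvK1_key h, pvK2_key h]

lemma pvLt_congr_left {a a' : List (String × String)} (b : List (String × String))
    (h : pvKey a = pvKey a') : pvLt a b = pvLt a' b := by
  simp only [pvLt, pvK1_key h, pvK2_key h]

lemma pvLt_trans_neg {x y z : List (String × String)} (h1 : pvLt x y = true)
    (h2 : pvLt z y = false) : pvLt x z = true := by
  rw [pvLt_iff] at h1 ⊢; rw [pvLt_false_iff] at h2; exact lt_of_lt_of_le h1 h2

lemma pvIns_cons (x y : List (String × String)) (ys : List (List (String × String))) :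
    pvIns x (y :: ys) = if pvLt x y then x :: y :: ys else y :: pvIns x ys := rfl

lemma mem_pvIns {w x : List (String × String)} {l : List (List (String × String))} :
    w ∈ pvIns x l ↔ w = x ∨ w ∈ l := PySem.List.mem_insertBy pvLt x w l

-- R: "b is not strictly before a" — the order the sorted list is pairwise in.
lemma pairwise_pvIns (x : List (String × String)) (l : List (List (String × String)))
    (hl : l.Pairwise (fun a b => pvLt b a = false)) :
    (pvIns x l).Pairwise (fun a b => pvLt b a = false) := by
  induction l with
  | nil => simpa [pvIns, PySem.List.insertBy] using List.pairwise_singleton _ _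
  | cons y ys ih =>
    rw [pvIns_cons]
    rcases List.pairwise_cons.1 hl with ⟨hy, hys⟩
    by_cases h : pvLt x y = true
    · simp only [h, if_true]
      refine List.pairwise_cons.2 ⟨?_, hl⟩
      intro z hz
      rcases List.mem_cons.1 hz with rfl | hz
      · exact pvLt_asymm h
      · by_contra hc
        have hzx : pvLt z x = true := by
          cases hzx : pvLt z x
          · exact absurd hzx hc
          · rfl
        have h2 := pvLt_trans hzx h
        rw [hy z hz] at h2
        exact Bool.false_ne_true h2
    · simp only [h]
      refine List.pairwise_cons.2 ⟨?_, ih hys⟩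
      intro z hz
      rcases mem_pvIns.1 hz with rfl | hz
      · simpa using h
      · exact hy z hz

lemma pairwise_pvSort (xs : List (List (String × String))) :
    (pvSort xs).Pairwise (fun a b => pvLt b a = false) := by
  suffices h : ∀ acc : List (List (String × String)),
      acc.Pairwise (fun a b => pvLt b a = false) →
      (xs.foldl (fun acc x => pvIns x acc) acc).Pairwise (fun a b => pvLt b a = false) by
    exact h [] List.Pairwise.nil
  induction xs with
  | nil => intro acc hacc; simpa using hacc
  | cons x xs ih =>
    intro acc hacc
    exact ih _ (pairwise_pvIns x acc hacc)

lemma pvSort_append_singleton (xs : List (List (String × String))) (x : List (String × String)) :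
    pvSort (xs ++ [x]) = pvIns x (pvSort xs) := by
  simp [pvSort, List.foldl_append]

lemma mem_pvSort {m : List (String × String)} {xs : List (List (String × String))} :
    m ∈ pvSort xs ↔ m ∈ xs := by
  rw [← sorted2_eq_pvSort]
  exact (PySem.List.sorted2_perm xs _ _ false).mem_iff

lemma mem_of_mem_pvF {m : List (String × String)} :
    ∀ {ys : List (List (String × String))} {s : List (String × String)}, m ∈ pvF s ys → m ∈ ys := by
  intro ys
  induction ys with
  | nil => intro s h; simp [pvF] at h
  | cons y t ih =>
    intro s h
    by_cases hy : pvKey y ∈ s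
    · simp only [pvF, hy, if_true] at h
      exact List.mem_cons_of_mem _ (ih h)
    · simp only [pvF, hy, if_false] at h
      rcases List.mem_cons.1 h with h | h
      · simp [h]
      · exact List.mem_cons_of_mem _ (ih h)

lemma pvF_congr_seen :
    ∀ (ys : List (List (String × String))) (s s' : List (String × String)),
      (∀ m ∈ ys, (pvKey m ∈ s ↔ pvKey m ∈ s')) → pvF s ys = pvF s' ys := by
  intro ys
  induction ys with
  | nil => intro s s' _; rfl
  | cons y t ih =>
    intro s s' h
    have hy := h y (List.mem_cons_self)
    by_cases hys : pvKey y ∈ s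
    · simp only [pvF, hys, hy.1 hys, if_true]
      exact ih s s' fun m hm => h m (List.mem_cons_of_mem _ hm)
    · have hys' : pvKey y ∉ s' := fun hc => hys (hy.2 hc)
      simp only [pvF, hys, hys', if_false]
      refine congrArg _ (ih _ _ fun m hm => ?_)
      simp only [List.mem_append, List.mem_singleton]
      exact or_congr_left (h m (List.mem_cons_of_mem _ hm))

lemma pvF_append :
    ∀ (xs ys : List (List (String × String))) (s : List (String × String)),
      pvF s (xs ++ ys) = pvF s xs ++ pvF (s ++ (pvF s xs).map pvKey) ys := by
  intro xs
  induction xs with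
  | nil => intro ys s; simp [pvF]
  | cons x t ih =>
    intro ys s
    by_cases hx : pvKey x ∈ s
    · simp only [List.cons_append, pvF, hx, if_true]
      exact ih ys s
    · simp only [List.cons_append, pvF, hx, if_false, List.map_cons, List.cons_append]
      rw [ih ys (s ++ [pvKey x])]
      simp

lemma mem_seen :
    ∀ (xs : List (List (String × String))) (s : List (String × String)) (k : String × String),
      (k ∈ s ++ (pvF s xs).map pvKey) ↔ (k ∈ s ∨ k ∈ xs.map pvKey) := by
  intro xs
  induction xs with
  | nil => intro s k; simp [pvF]
  | cons x t ih =>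
    intro s k
    by_cases hx : pvKey x ∈ s
    · simp only [pvF, hx, if_true, List.map_cons, List.mem_cons]
      rw [ih s k]
      constructor
      · rintro (h | h) <;> tauto
      · rintro (h | rfl | h) <;> tauto
    · simp only [pvF, hx, if_false, List.map_cons, List.mem_cons]
      have := ih (s ++ [pvKey x]) k
      simp only [List.mem_append, List.mem_cons] at this ⊢
      tauto

-- L1: inserting a duplicate-key element into a sorted list does not change the filter.
lemma pvF_pvIns_dup :
    ∀ (ys : List (List (String × String))) (s : List (String × String)) (x : List (String × String)),
      ys.Pairwise (fun a b => pvLt b a = false) →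
      (pvKey x ∈ s ∨ ∃ y ∈ ys, pvKey y = pvKey x) →
      pvF s (pvIns x ys) = pvF s ys := by
  intro ys
  induction ys with
  | nil =>
    intro s x _ h
    rcases h with h | ⟨y, hy, _⟩
    · simp [pvIns, PySem.List.insertBy, pvF, h]
    · simp at hy
  | cons y t ih =>
    intro s x hp h
    rcases List.pairwise_cons.1 hp with ⟨hy, ht⟩
    rw [pvIns_cons]
    by_cases hb : pvLt x y = true
    · rw [if_pos hb]
      -- any duplicate-key mate in y :: t would contradict sortedness; so pvKey x ∈ s
      have hxs : pvKey x ∈ s := by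
        rcases h with h | ⟨y', hy', hk⟩
        · exact h
        · exfalso
          rcases List.mem_cons.1 hy' with rfl | hy'
          · rw [pvLt_of_key hk.symm] at hb; exact Bool.false_ne_true hb
          · have h1 : pvLt y' y = false := hy y' hy'
            rw [pvLt_congr_left y hk] at h1
            rw [h1] at hb; exact Bool.false_ne_true hb
      simp [pvF, hxs]
    · rw [if_neg hb]
      by_cases hys : pvKey y ∈ s
      · simp only [pvF_cons, hys, if_true]
        refine ih s x ht ?_
        rcases h with h | ⟨y', hy', hk⟩
        · exact Or.inl h
        · rcases List.mem_cons.1 hy' with rfl | hy'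
          · exact Or.inl (hk ▸ hys)
          · exact Or.inr ⟨y', hy', hk⟩
      · simp only [pvF_cons, hys, if_false]
        refine congrArg _ (ih (s ++ [pvKey y]) x ht ?_)
        rcases h with h | ⟨y', hy', hk⟩
        · exact Or.inl (by simp [h])
        · rcases List.mem_cons.1 hy' with rfl | hy'
          · exact Or.inl (by simp [hk])
          · exact Or.inr ⟨y', hy', hk⟩

-- L2: inserting a fresh-key element commutes with the filter.
lemma pvF_pvIns_fresh :
    ∀ (ys : List (List (String × String))) (s : List (String × String)) (x : List (String × String)),
      ys.Pairwise (fun a b => pvLt b a = false) →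
      pvKey x ∉ s →
      (∀ y ∈ ys, pvKey y ≠ pvKey x) →
      pvF s (pvIns x ys) = pvIns x (pvF s ys) := by
  intro ys
  induction ys with
  | nil => intro s x _ hs _; simp [pvIns, PySem.List.insertBy, pvF, hs]
  | cons y t ih =>
    intro s x hp hs hk
    rcases List.pairwise_cons.1 hp with ⟨hy, ht⟩
    rw [pvIns_cons]
    by_cases hb : pvLt x y = true
    · rw [if_pos hb]
      -- x's key is unseen, so pvF keeps x first; and x is before everything in pvF s (y :: t)
      have hseen : pvF (s ++ [pvKey x]) (y :: t) = pvF s (y :: t) := by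
        refine pvF_congr_seen (y :: t) _ _ fun m hm => ?_
        simp only [List.mem_append, List.mem_singleton]
        have : pvKey m ≠ pvKey x := hk m hm
        tauto
      rw [pvF_cons, if_neg hs, hseen]
      -- RHS: x goes first in pvIns x (pvF s (y :: t)) since x is before its head
      cases hF : pvF s (y :: t) with
      | nil => simp [pvIns, PySem.List.insertBy]
      | cons z rest =>
        have hz : z ∈ y :: t := mem_of_mem_pvF (hF ▸ List.mem_cons_self)
        have hxz : pvLt x z = true := by
          rcases List.mem_cons.1 hz with rfl | hz
          · exact hb
          · exact pvLt_trans_neg hb (hy z hz)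
        rw [pvIns_cons, if_pos hxz]
    · rw [if_neg hb]
      by_cases hys : pvKey y ∈ s
      · simp only [pvF_cons, hys, if_true]
        exact ih s x ht hs fun y' hy' => hk y' (List.mem_cons_of_mem _ hy')
      · simp only [pvF_cons, hys, if_false]
        have hxs' : pvKey x ∉ s ++ [pvKey y] := by
          simp only [List.mem_append, List.mem_singleton]
          rintro (h | h)
          · exact hs h
          · exact hk y List.mem_cons_self h.symm
        rw [ih (s ++ [pvKey y]) x ht hxs' fun y' hy' => hk y' (List.mem_cons_of_mem _ hy'),
          pvIns_cons, if_neg hb]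

-- sort commutes with the first-occurrence filter
lemma pvSort_pvF_comm (xs : List (List (String × String))) :
    ∀ s, pvSort (pvF s xs) = pvF s (pvSort xs) := by
  induction xs using List.reverseRecOn with
  | nil => intro s; rfl
  | append_singleton xs x ih =>
    intro s
    rw [pvF_append xs [x] s, pvSort_append_singleton]
    by_cases h : pvKey x ∈ s ++ (pvF s xs).map pvKey
    · have hdup : pvKey x ∈ s ∨ pvKey x ∈ xs.map pvKey := (mem_seen xs s _).1 h
      simp only [pvF, h, if_true, List.append_nil]
      rw [ih s]
      refine (pvF_pvIns_dup (pvSort xs) s x (pairwise_pvSort xs) ?_).symm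
      rcases hdup with hd | hd
      · exact Or.inl hd
      · rcases List.mem_map.1 hd with ⟨y, hy, hk⟩
        exact Or.inr ⟨y, mem_pvSort.2 hy, hk⟩
    · have hfr : pvKey x ∉ s ∧ pvKey x ∉ xs.map pvKey := by
        have := (mem_seen xs s (pvKey x)).not.1 h
        tauto
      simp only [pvF, h, if_false]
      rw [pvSort_append_singleton, ih s]
      refine (pvF_pvIns_fresh (pvSort xs) s x (pairwise_pvSort xs) hfr.1 fun y hy hc => ?_).symm
      exact hfr.2 (List.mem_map.2 ⟨y, mem_pvSort.1 hy, hc⟩)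

-- A's dict loop produces exactly the first-occurrence filter (values in insertion order).
lemma dict_loop_values :
    ∀ (xs : List (List (String × String))) (d : PySem.Dict (String × String) (List (String × String))),
      d.keys.Nodup →
      ((xs.foldl
        (fun d model =>
          if !(d.contains (pvKey model)) then d.insert (pvKey model) model else d) d).values
        = d.values ++ pvF d.keys xs) := by
  intro xs
  induction xs with
  | nil => intro d _; simp [pvF]
  | cons m ms ih =>
    intro d hd
    by_cases hc : d.contains (pvKey m) = true
    · have hmem : pvKey m ∈ d.keys := (PySem.Dict.contains_iff_mem_keys _ _).1 hc
      simp only [List.foldl_cons, hc, Bool.not_true, pvF, hmem, if_true]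
      exact ih d hd
    · have hc' : d.contains (pvKey m) = false := by
        cases hcc : d.contains (pvKey m); rfl; exact absurd hcc hc
      have hmem : pvKey m ∉ d.keys := fun hm =>
        hc ((PySem.Dict.contains_iff_mem_keys _ _).2 hm)
      simp only [List.foldl_cons, hc', Bool.not_false, if_true, pvF, hmem, if_false]
      rw [ih _ (PySem.Dict.nodup_keys_insert d (pvKey m) m hd)]
      rw [PySem.Dict.keys_insert_of_not_contains d m hc']
      have hv : (d.insert (pvKey m) m).values = d.values ++ [m] := by
        simp [PySem.Dict.values, PySem.Dict.items_insert_of_not_contains d m hc']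
      rw [hv]
      simp

-- B's loop produces the first-occurrence filter directly.
lemma set_loop_snd :
    ∀ (ys : List (List (String × String))) (s : PySem.Set (String × String))
      (acc : List (List (String × String))),
      ((ys.foldl
        (fun (st : PySem.Set (String × String) × List (List (String × String))) model =>
          if PySem.Set.contains st.1 (pvKey model) then st
          else (PySem.Set.add st.1 (pvKey model), st.2 ++ [model])) (s, acc)).2
        = acc ++ pvF s ys) := by
  intro ys
  induction ys with
  | nil => intro s acc; simp [pvF]
  | cons m ms ih =>
    intro s acc
    rw [List.foldl_cons, pvF_cons]
    by_cases hc : pvKey m ∈ s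
    · have hct : PySem.Set.contains s (pvKey m) = true := by
        simp [PySem.Set.contains, hc]
      rw [if_pos hct, if_pos hc]
      exact ih s acc
    · have hcf : ¬ (PySem.Set.contains s (pvKey m) = true) := by
        simp [PySem.Set.contains, hc]
      have hadd : PySem.Set.add s (pvKey m) = s ++ [pvKey m] := by
        simp [PySem.Set.add, PySem.Set.contains, hc]
      rw [if_neg hcf, if_neg hc, hadd, ih (s ++ [pvKey m]) (acc ++ [m])]
      simp

-- ===== VERDICT (by name: the statement is the Claim_ definition above) =====
theorem merge_and_deduplicate_spec : Claim_equal_merge_and_deduplicate := by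
  intro l1 l2 _ _
  unfold Spec_merge_and_deduplicate merge_and_deduplicate merge_and_deduplicate_alt
  rw [sorted2_eq_pvSort, sorted2_eq_pvSort]
  rw [dict_loop_values (l1 ++ l2) PySem.Dict.empty PySem.Dict.nodup_keys_empty]
  rw [set_loop_snd (pvSort (l1 ++ l2)) PySem.Set.empty []]
  simp only [List.nil_append]
  have hempty_values : (PySem.Dict.empty : PySem.Dict (String × String) (List (String × String))).values = [] := rfl
  have hempty_keys : (PySem.Dict.empty : PySem.Dict (String × String) (List (String × String))).keys = [] := rfl
  rw [hempty_values, hempty_keys, List.nil_append]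
  have : (PySem.Set.empty : PySem.Set (String × String)) = [] := rfl
  rw [this]
  exact pvSort_pvF_comm (l1 ++ l2) []
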